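-- pv_equiv track=rewrite | github.com/jeong1suk/Algorithm | 프로그래머스/2/42587. 프로세스/프로세스.py | solution
-- ===== SOURCE A (Python) =====
-- from collections import deque
--
-- def solution(priorities, location):
--     answer = 0
--     data = deque(enumerate(priorities))
--     while data:
--         idx, p = data.popleft()
--         if not data:
--             return answer+1
--         max_idx, max_p = max(data, key=lambda x:x[1])
--         if p < max_p:
--             data.append((idx, p))
--         else:
--             answer += 1
--             if idx == location:
--                 return answer
-- ===== SOURCE B (Python) =====
-- def solution(priorities, location):
--     q = list(enumerate(priorities))
--     rank = 0
--     while q: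
--         top = max(p for _, p in q)
--         k = [p for _, p in q].index(top)
--         rank += 1
--         if q[k][0] == location:
--             return rank
--         q = q[k + 1:] + q[:k]
--     return rank
-- ===== Notes on version B (the rewrite author's own statement) =====
-- stated objective: faster
-- what changed: B drops the deque simulation that rotates one element at a time (rescanning the whole queue with max() on every rotation) and instead, each round, finds the first maximal-priority element in one scan and rotates the queue past it with slicing, so it does one scan per executed process instead of one per rotation.
-- outside the precondition, e.g. on solution([], 0): A returns None, B returns 0
import Mathlib
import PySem

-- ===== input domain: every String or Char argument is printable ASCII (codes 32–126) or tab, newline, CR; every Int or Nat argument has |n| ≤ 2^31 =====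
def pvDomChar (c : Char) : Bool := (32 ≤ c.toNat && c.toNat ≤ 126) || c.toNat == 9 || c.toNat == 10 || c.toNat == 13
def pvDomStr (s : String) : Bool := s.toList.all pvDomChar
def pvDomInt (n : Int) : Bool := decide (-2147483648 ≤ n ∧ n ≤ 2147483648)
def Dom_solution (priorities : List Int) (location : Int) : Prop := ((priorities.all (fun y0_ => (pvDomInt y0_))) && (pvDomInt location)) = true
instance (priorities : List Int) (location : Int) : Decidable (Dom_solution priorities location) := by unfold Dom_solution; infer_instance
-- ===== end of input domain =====

-- B replaces A's one-step deque rotation (which rescans the queue with max() on every rotation)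
-- by jumping straight to the first maximal-priority element each round via one scan and a slice
-- rotation, one round per executed process; objective: faster.

-- running max of the second components, init a  (used by the ports' max computations and the measure)
def pvF : Int → (Int × Int) → Int := fun m x => max m x.2

-- max priority of a nonempty queue (only used for solutionLoop's termination measure)
def pvTop : List (Int × Int) → Int
  | [] => 0
  | e :: t => t.foldl pvF e.2

-- index of the first maximal-priority element (termination measure component)
def pvFTI (q : List (Int × Int)) : Nat := q.findIdx (fun e => decide (pvTop q ≤ e.2))

-- these two facts are needed by solutionLoop's decreasing_by, so they stay above the port
theorem pvFoldlMax_le (t : List (Int × Int)) (a : Int) : a ≤ t.foldl pvF a := by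
  induction t generalizing a with
  | nil => simp
  | cons x xs ih =>
    simp only [List.foldl_cons]
    exact le_trans (le_max_left a x.2) (ih (pvF a x))

theorem pvFoldlMax_ub (t : List (Int × Int)) (a : Int) :
    ∀ x ∈ t, x.2 ≤ t.foldl pvF a := by
  induction t generalizing a with
  | nil => simp
  | cons y ys ih =>
    intro x hx
    rcases List.mem_cons.mp hx with h | h
    · subst h
      exact le_trans (le_max_right a x.2) (pvFoldlMax_le ys (pvF a x))
    · exact ih (pvF a y) x h

theorem pvFoldlMax_cases (t : List (Int × Int)) (a : Int) :
    t.foldl pvF a = a ∨ ∃ x ∈ t, t.foldl pvF a = x.2 := by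
  induction t generalizing a with
  | nil => simp
  | cons y ys ih =>
    simp only [List.foldl_cons]
    by_cases hab : a ≤ y.2
    · have he : pvF a y = y.2 := by simp [pvF, max_eq_right hab]
      rw [he]
      rcases ih y.2 with h | ⟨x, hx, hex⟩
      · right; exact ⟨y, by simp, h⟩
      · right; exact ⟨x, by simp [hx], hex⟩
    · have he : pvF a y = a := by simp [pvF, max_eq_left (not_le.mp hab).le]
      rw [he]
      rcases ih a with h | ⟨x, hx, hex⟩
      · left; exact h
      · right; exact ⟨x, by simp [hx], hex⟩

theorem pvFoldlMax_init (t : List (Int × Int)) (a b : Int) :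
    t.foldl pvF (max a b) = max a (t.foldl pvF b) := by
  induction t generalizing b with
  | nil => simp
  | cons y ys ih =>
    simp only [List.foldl_cons, pvF, max_assoc]
    exact ih (max b y.2)

-- the first maximal element of rest (as returned by Python's max(data, key=...)) has the running-max value
theorem pvMaxSnd_eq (r : Int × Int) (rs : List (Int × Int)) (m : Int × Int)
    (h : PySem.List.max? (r :: rs) (fun x => x.2) = some m) :
    rs.foldl pvF r.2 = m.2 := by
  have hmem : m ∈ r :: rs := PySem.List.max?_mem h
  have hub : ∀ y ∈ r :: rs, y.2 ≤ m.2 := PySem.List.max?_isMax h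
  apply le_antisymm
  · rcases pvFoldlMax_cases rs r.2 with he | ⟨x, hx, he⟩
    · rw [he]; exact hub r (by simp)
    · rw [he]; exact hub x (by simp [hx])
  · rcases List.mem_cons.mp hmem with hm | hm
    · rw [hm]; exact pvFoldlMax_le rs r.2
    · exact pvFoldlMax_ub rs r.2 m hm

-- the measure decreases on the rotation step (cited by solutionLoop's decreasing_by)
theorem pvFTI_rot (idx p : Int) (r : Int × Int) (rs : List (Int × Int)) (m : Int × Int)
    (hm : PySem.List.max? (r :: rs) (fun x => x.2) = some m) (hp : p < m.2) :
    pvFTI ((r :: rs) ++ [(idx, p)]) < pvFTI ((idx, p) :: r :: rs) := by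
  have hT : rs.foldl pvF r.2 = m.2 := pvMaxSnd_eq r rs m hm
  -- tops of both queues equal m.2
  have htop1 : pvTop ((idx, p) :: r :: rs) = m.2 := by
    have : (r :: rs).foldl pvF p = max p (rs.foldl pvF r.2) := by
      have := pvFoldlMax_init rs p r.2
      simpa [pvF, List.foldl_cons] using this
    simp [pvTop, this, hT, max_eq_right (le_of_lt hp)]
  have htop2 : pvTop ((r :: rs) ++ [(idx, p)]) = m.2 := by
    simp only [pvTop, List.cons_append, List.foldl_append]
    simp [pvF, hT, max_eq_left (le_of_lt hp)]
  have hw : ∃ x ∈ r :: rs, (fun e => decide (m.2 ≤ e.2)) x = true := by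
    refine ⟨m, PySem.List.max?_mem hm, by simp⟩
  have hlt : (r :: rs).findIdx (fun e => decide (m.2 ≤ e.2)) < (r :: rs).length :=
    List.findIdx_lt_length.mpr (by simpa using hw)
  simp only [pvFTI, htop1, htop2]
  rw [List.findIdx_append, if_pos hlt]
  have hd : decide (m.2 ≤ p) = false := by simp [not_le.mpr hp]
  have hR : List.findIdx (fun e => decide (m.2 ≤ e.2)) ((idx, p) :: r :: rs)
      = List.findIdx (fun e => decide (m.2 ≤ e.2)) (r :: rs) + 1 := by
    rw [List.findIdx_cons]
    simp [hd]
  rw [hR]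
  omega

-- ===== PORT A =====
-- the while-loop of A: state = (data, answer); q = [] is the while-exit (Python falls off and
-- returns None there; unreachable when the initial list is nonempty, i.e. under Pre_solution)
def solutionLoop (location : Int) (q : List (Int × Int)) (answer : Int) : Int :=
  match q with
  | [] => answer
  | (idx, p) :: rest =>
    if rest = [] then answer + 1                               -- if not data: return answer+1
    else
      match hm : PySem.List.max? rest (fun x => x.2) with      -- max(data, key=lambda x: x[1])
      | none => answer                                         -- unreachable: rest ≠ []
      | some m =>
        if p < m.2 then solutionLoop location (rest ++ [(idx, p)]) answer
        else if idx == location then answer + 1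
        else solutionLoop location rest (answer + 1)
termination_by (q.length, pvFTI q)
decreasing_by
  · apply Prod.Lex.right'
    · simp
    · rename_i hne hlt
      match rest, hm with
      | r :: rs, hm => exact pvFTI_rot idx p r rs m hm hlt
  · apply Prod.Lex.left; simp

def solution (priorities : List Int) (location : Int) : Int :=
  solutionLoop location (PySem.List.enumerate priorities) 0

-- ===== PORT B =====
-- the while-loop of B: each iteration serves the first maximal-priority element directly
def solutionAltLoop (location : Int) (q : List (Int × Int)) (rank : Int) : Int :=
  match q with
  | [] => rank
  | e :: t =>
    let top := t.foldl pvF e.2                                    -- top = max(p for _, p in q)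
    let k := (e :: t).findIdx (fun x => x.2 == top)               -- k = [p for _, p in q].index(top)
    if ((e :: t).getD k (0, 0)).1 == location then rank + 1       -- q[k][0] == location (k always in range)
    else solutionAltLoop location ((e :: t).drop (k + 1) ++ (e :: t).take k) (rank + 1)
termination_by q.length
decreasing_by
  have hw : ∃ x ∈ e :: t, (fun x => x.2 == t.foldl pvF e.2) x = true := by
    rcases pvFoldlMax_cases t e.2 with h | ⟨x, hx, h⟩
    · exact ⟨e, by simp, by simp [h]⟩
    · exact ⟨x, by simp [hx], by simp [h]⟩
  have hk : (e :: t).findIdx (fun x => x.2 == t.foldl pvF e.2) < (e :: t).length :=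
    List.findIdx_lt_length.mpr (by simpa using hw)
  simp only [List.foldl_attach]
  simp only [List.length_append, List.length_drop, List.length_take, List.length_cons] at *
  omega

def solution_alt (priorities : List Int) (location : Int) : Int :=
  solutionAltLoop location (PySem.List.enumerate priorities) 0

-- ===== PRECONDITION & SPEC =====
-- Pre_ excludes only the empty list, on which Python A falls off the while loop and returns None (not an int).
def Pre_solution (priorities : List Int) (location : Int) : Prop := priorities ≠ []
instance (priorities : List Int) (location : Int) : Decidable (Pre_solution priorities location) := by
  unfold Pre_solution; infer_instance

def pvWitness_solution : List Int × Int := ([2, 1, 3, 2], 2)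

def Spec_solution (priorities : List Int) (location : Int) (out : Int) : Prop := out = solution_alt priorities location
instance (priorities : List Int) (location : Int) (out : Int) : Decidable (Spec_solution priorities location out) := by unfold Spec_solution; infer_instance

-- ===== CLAIM (what is proved, stated in full; the proofs are below) =====
def Claim_equal_solution : Prop := ∀ (priorities : List Int) (location : Int), Dom_solution priorities location → Pre_solution priorities location → Spec_solution priorities location (solution priorities location)

-- ===== LEMMAS AND PROOFS =====

-- when every remaining priority is ≤ the front's, B serves the front element
theorem pvFoldl_of_ub (t : List (Int × Int)) (a : Int) (h : ∀ x ∈ t, x.2 ≤ a) :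
    t.foldl pvF a = a := by
  rcases pvFoldlMax_cases t a with he | ⟨x, hx, he⟩
  · exact he
  · exact le_antisymm (he ▸ h x hx) (pvFoldlMax_le t a)

theorem alt_exec (location idx p answer : Int) (rest : List (Int × Int))
    (h : ∀ x ∈ rest, x.2 ≤ p) :
    solutionAltLoop location ((idx, p) :: rest) answer =
      if (idx == location) = true then answer + 1
      else solutionAltLoop location rest (answer + 1) := by
  rw [solutionAltLoop]
  have htop : rest.foldl pvF p = p := pvFoldl_of_ub rest p h
  have hk : ((idx, p) :: rest).findIdx (fun x => x.2 == rest.foldl pvF p) = 0 := by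
    rw [List.findIdx_cons]
    simp [htop]
  simp [hk]

theorem alt_rot (location idx p answer : Int) (r : Int × Int) (rs : List (Int × Int))
    (hp : p < rs.foldl pvF r.2) :
    solutionAltLoop location ((idx, p) :: r :: rs) answer =
      solutionAltLoop location ((r :: rs) ++ [(idx, p)]) answer := by
  set T := rs.foldl pvF r.2 with hTdef
  have htop1 : (r :: rs).foldl pvF p = T := by
    have h1 : (r :: rs).foldl pvF p = max p T := by
      have := pvFoldlMax_init rs p r.2
      simpa [pvF, List.foldl_cons] using this
    rw [h1, max_eq_right (le_of_lt hp)]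
  have htop2 : (rs ++ [(idx, p)]).foldl pvF r.2 = T := by
    rw [List.foldl_append]
    simp only [List.foldl_cons, List.foldl_nil, ← hTdef, pvF]
    exact max_eq_left (le_of_lt hp)
  -- position of the first maximal element inside r :: rs
  set k := (r :: rs).findIdx (fun x => x.2 == T) with hkdef
  have hw : ∃ x ∈ r :: rs, (fun x => x.2 == T) x = true := by
    rcases pvFoldlMax_cases rs r.2 with he | ⟨x, hx, he⟩
    · exact ⟨r, by simp, by simp [hTdef, he]⟩
    · exact ⟨x, by simp [hx], by simp [hTdef, he]⟩
  have hklt : k < (r :: rs).length := by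
    rw [hkdef]; exact List.findIdx_lt_length.mpr (by simpa using hw)
  have hk1 : ((idx, p) :: r :: rs).findIdx (fun x => x.2 == T) = k + 1 := by
    have hpt : (p == T) = false := by
      simp only [beq_eq_false_iff_ne]
      exact ne_of_lt hp
    rw [List.findIdx_cons]
    simp [hpt, ← hkdef]
  have hk2 : ((r :: rs) ++ [(idx, p)]).findIdx (fun x => x.2 == T) = k := by
    rw [List.findIdx_append, if_pos (hkdef ▸ hklt)]
  have hget : ((idx, p) :: r :: rs).getD (k + 1) (0, 0) = ((r :: rs) ++ [(idx, p)]).getD k (0, 0) := by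
    simp only [List.getD_cons_succ]
    rw [List.getD_append _ _ _ _ hklt]
  have hlist : ((idx, p) :: r :: rs).drop (k + 1 + 1) ++ ((idx, p) :: r :: rs).take (k + 1) =
      ((r :: rs) ++ [(idx, p)]).drop (k + 1) ++ ((r :: rs) ++ [(idx, p)]).take k := by
    rw [List.drop_append_of_le_length (by omega), List.take_append_of_le_length (by omega)]
    simp [List.append_assoc]
  simp only [List.cons_append] at hk2 hget hlist ⊢
  rw [solutionAltLoop.eq_def]
  conv_rhs => rw [solutionAltLoop.eq_def]
  simp only [htop1, htop2, hk1, hk2, hget, hlist]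

theorem main_lemma (location : Int) (q : List (Int × Int)) (answer : Int) :
    solutionLoop location q answer = solutionAltLoop location q answer := by
  induction q, answer using solutionLoop.induct location with
  | case1 answer => rw [solutionLoop, solutionAltLoop]
  | case2 answer idx p =>
    rw [solutionLoop, alt_exec location idx p answer [] (by simp)]
    rw [solutionAltLoop]
    simp
  | case3 answer idx p rest hne hm =>
    rw [PySem.List.max?_eq_none_iff] at hm
    exact absurd hm hne
  | case4 answer idx p rest hne m hm hp ih =>
    match rest, hm with
    | r :: rs, hm =>
      have hT : rs.foldl pvF r.2 = m.2 := pvMaxSnd_eq r rs m hm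
      rw [solutionLoop]
      simp only [if_neg hne]
      split
      · rename_i h; rw [hm] at h; exact absurd h (by simp)
      · rename_i m' h
        rw [hm] at h
        injection h with h
        subst h
        rw [if_pos hp, ih, ← alt_rot location idx p answer r rs (hT ▸ hp)]
  | case5 answer idx p rest hne m hm hp hloc =>
    have hub : ∀ x ∈ rest, x.2 ≤ p :=
      fun x hx => le_trans (PySem.List.max?_isMax hm x hx) (not_lt.mp hp)
    rw [solutionLoop]
    simp only [if_neg hne]
    rw [alt_exec location idx p answer rest hub, if_pos hloc]
    split
    · rename_i h; rw [hm] at h; exact absurd h (by simp)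
    · rename_i m' h
      rw [hm] at h
      injection h with h
      subst h
      rw [if_neg hp, if_pos hloc]
  | case6 answer idx p rest hne m hm hp hloc ih =>
    have hub : ∀ x ∈ rest, x.2 ≤ p :=
      fun x hx => le_trans (PySem.List.max?_isMax hm x hx) (not_lt.mp hp)
    rw [solutionLoop]
    simp only [if_neg hne]
    rw [alt_exec location idx p answer rest hub, if_neg hloc]
    split
    · rename_i h; rw [hm] at h; exact absurd h (by simp)
    · rename_i m' h
      rw [hm] at h
      injection h with h
      subst h
      rw [if_neg hp, if_neg hloc, ih]

-- ===== VERDICT (by name: the statement is the Claim_ definition above) =====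
theorem solution_spec : Claim_equal_solution := by
  intro priorities location _ _
  unfold Spec_solution solution solution_alt
  exact main_lemma _ _ _
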